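-- pv_equiv track=rewrite | github.com/AmPaschal/AutoUP | src/coverage_debugger/coverage_debugger.py | get_uncovered_code_block
-- ===== SOURCE A (Python) =====
-- def get_uncovered_code_block(coverage_data: dict[str, str], skipped_blocks: set[str]):
--     current_start_line = None
--     last_status = None
--     current_missed_line_count = 0
--
--     # Track all missed blocks
--     missed_blocks = []
--     last_line = list(coverage_data.keys())[-1]
--
--     for line, status in coverage_data.items():
--         if last_status != "missed" and status == "missed":
--             current_start_line = line
--             current_missed_line_count = 0
--
--         if status == "missed":
--             current_missed_line_count += 1
--
--         if status != "missed" or line == last_line: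
--             if current_start_line is not None and current_missed_line_count > 0:
--                 # Add missed block (start, count)
--                 missed_blocks.append((current_start_line, current_missed_line_count))
--             current_missed_line_count = 0
--             current_start_line = None
--
--         last_status = status
--
--     # Sort blocks by size (descending)
--     missed_blocks.sort(key=lambda x: x[1], reverse=True)
--
--     # Pick the largest missed block not containing a skipped block
--     for start_line, _ in missed_blocks:
--         if start_line not in skipped_blocks:
--             return start_line
--
--     # If all blocks are skipped, return None
--     return None
-- ===== SOURCE B (Python) =====
-- def get_uncovered_code_block(coverage_data: dict[str, str], skipped_blocks: set[str]):
--     # One pass: collect (start, length) of each maximal run of "missed" lines,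
--     # then pick the largest non-skipped one with max() (first maximum on ties).
--     blocks = []
--     run_start, run_status, run_len = None, None, 0
--     for line, status in coverage_data.items():
--         if status == run_status:
--             run_len += 1
--         else:
--             if run_status == "missed":
--                 blocks.append((run_start, run_len))
--             run_start, run_status, run_len = line, status, 1
--     if run_status == "missed":
--         blocks.append((run_start, run_len))
--     candidates = [(start, size) for start, size in blocks if start not in skipped_blocks]
--     if not candidates:
--         return None
--     return max(candidates, key=lambda b: b[1])[0]
-- ===== Notes on version B (the rewrite author's own statement) =====
-- stated objective: alternative
-- what changed: Replaces A's last-line-sentinel state machine followed by a stable descending sort and a first-not-skipped scan with a single run-collecting pass (flush on status change plus one final flush) and a direct max(candidates, key=size), eliminating the sort entirely.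
-- crash fix: On empty coverage_data A raises IndexError (list(coverage_data.keys())[-1]); B returns None. — e.g. on get_uncovered_code_block([], ["1"]): A raises IndexError, B returns none
import Mathlib
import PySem

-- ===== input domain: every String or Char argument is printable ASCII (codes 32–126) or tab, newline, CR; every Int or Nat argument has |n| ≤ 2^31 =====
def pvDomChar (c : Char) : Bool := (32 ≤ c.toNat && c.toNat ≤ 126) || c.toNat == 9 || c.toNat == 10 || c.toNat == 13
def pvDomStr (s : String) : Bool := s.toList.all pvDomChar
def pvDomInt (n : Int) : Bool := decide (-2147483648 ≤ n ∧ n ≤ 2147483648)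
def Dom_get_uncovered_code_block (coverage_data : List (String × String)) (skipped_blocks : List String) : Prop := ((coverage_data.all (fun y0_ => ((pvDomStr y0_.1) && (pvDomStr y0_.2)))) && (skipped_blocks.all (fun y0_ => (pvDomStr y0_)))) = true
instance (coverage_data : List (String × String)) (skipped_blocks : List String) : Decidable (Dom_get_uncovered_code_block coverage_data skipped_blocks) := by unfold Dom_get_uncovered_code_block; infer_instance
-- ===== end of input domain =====

-- B drops A's last-line sentinel and descending sort: one run-collecting pass plus
-- max(candidates, key=size); return values proved equal on nonempty, duplicate-free input.

-- ===== PORT A =====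
-- A's loop body; state = (current_start_line, last_status, current_missed_line_count, missed_blocks)
def pvStepA (last_line : String) (st : Option String × Option String × Int × List (String × Int))
    (kv : String × String) : Option String × Option String × Int × List (String × Int) :=
  let line := kv.1
  let status := kv.2
  let cur1 := if st.2.1 ≠ some "missed" ∧ status = "missed" then some line else st.1
  let cnt1 := if st.2.1 ≠ some "missed" ∧ status = "missed" then (0 : Int) else st.2.2.1
  let cnt2 := if status = "missed" then cnt1 + 1 else cnt1
  if status ≠ "missed" ∨ line = last_line then
    (none, some status, 0,
      if cur1.isSome ∧ 0 < cnt2 then st.2.2.2 ++ [(cur1.getD "", cnt2)] else st.2.2.2)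
  else (cur1, some status, cnt2, st.2.2.2)

def get_uncovered_code_block (coverage_data : List (String × String)) (skipped_blocks : List String) : Option String :=
  match PySem.List.pyGet? (coverage_data.map Prod.fst) (-1) with
  | none => none  -- Python raises IndexError here (empty coverage_data); excluded by Pre_
  | some last_line =>
    let st := coverage_data.foldl (pvStepA last_line) (none, none, 0, [])
    let missed_blocks := PySem.List.sorted st.2.2.2 (fun x => x.2) true
    (missed_blocks.find? (fun b => !(skipped_blocks.contains b.1))).map Prod.fst

-- ===== PORT B =====
-- B's loop body; state = (blocks, run_start, run_status, run_len)
def pvStepB (st : List (String × Int) × Option String × Option String × Int)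
    (kv : String × String) : List (String × Int) × Option String × Option String × Int :=
  if some kv.2 = st.2.2.1 then (st.1, st.2.1, st.2.2.1, st.2.2.2 + 1)
  else
    ((if st.2.2.1 = some "missed" then st.1 ++ [(st.2.1.getD "", st.2.2.2)] else st.1),
      some kv.1, some kv.2, 1)

-- the trailing 'if run_status == "missed": blocks.append(...)' of Source B
def pvFlushB (st : List (String × Int) × Option String × Option String × Int) : List (String × Int) :=
  if st.2.2.1 = some "missed" then st.1 ++ [(st.2.1.getD "", st.2.2.2)] else st.1

def get_uncovered_code_block_alt (coverage_data : List (String × String)) (skipped_blocks : List String) : Option String :=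
  let blocks := pvFlushB (coverage_data.foldl pvStepB ([], none, none, 0))
  let candidates := blocks.filter (fun b => !(skipped_blocks.contains b.1))
  if candidates = [] then none
  else (PySem.List.max? candidates (fun b => b.2)).map Prod.fst

-- ===== PRECONDITION & SPEC =====
-- Pre_ excludes the empty coverage_data (A raises IndexError on list(...)[-1]) and duplicate
-- line keys (coverage_data is a Python dict, which cannot carry duplicate keys; the assoc-list
-- behaviour there would be accidental).
def Pre_get_uncovered_code_block (coverage_data : List (String × String)) (skipped_blocks : List String) : Prop :=
  coverage_data ≠ [] ∧ (coverage_data.map Prod.fst).Nodup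
instance (coverage_data : List (String × String)) (skipped_blocks : List String) : Decidable (Pre_get_uncovered_code_block coverage_data skipped_blocks) := by unfold Pre_get_uncovered_code_block; infer_instance
def pvWitness_get_uncovered_code_block : (List (String × String)) × List String :=
  ([("1", "missed"), ("2", "covered"), ("3", "missed"), ("4", "missed")], ["3"])

-- A raises IndexError on an empty coverage_data; B returns None there.
def Raises_get_uncovered_code_block (coverage_data : List (String × String)) (skipped_blocks : List String) : Prop :=
  coverage_data = []
instance (coverage_data : List (String × String)) (skipped_blocks : List String) : Decidable (Raises_get_uncovered_code_block coverage_data skipped_blocks) := by unfold Raises_get_uncovered_code_block; infer_instance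
def pvRaiseWitness_get_uncovered_code_block : (List (String × String)) × List String := ([], ["1"])
def pvRaiseWitnessOut_get_uncovered_code_block : Option String := none

def Spec_get_uncovered_code_block (coverage_data : List (String × String)) (skipped_blocks : List String) (out : Option String) : Prop := out = get_uncovered_code_block_alt coverage_data skipped_blocks
instance (coverage_data : List (String × String)) (skipped_blocks : List String) (out : Option String) : Decidable (Spec_get_uncovered_code_block coverage_data skipped_blocks out) := by unfold Spec_get_uncovered_code_block; infer_instance

-- ===== CLAIM (what is proved, stated in full; the proofs are below) =====
def Claim_equal_get_uncovered_code_block : Prop := ∀ (coverage_data : List (String × String)) (skipped_blocks : List String), Dom_get_uncovered_code_block coverage_data skipped_blocks → Pre_get_uncovered_code_block coverage_data skipped_blocks → Spec_get_uncovered_code_block coverage_data skipped_blocks (get_uncovered_code_block coverage_data skipped_blocks)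
def Claim_raises_get_uncovered_code_block : Prop := (∀ (coverage_data : List (String × String)) (skipped_blocks : List String), Dom_get_uncovered_code_block coverage_data skipped_blocks → Raises_get_uncovered_code_block coverage_data skipped_blocks → ¬ Pre_get_uncovered_code_block coverage_data skipped_blocks) ∧ (Dom_get_uncovered_code_block (pvRaiseWitness_get_uncovered_code_block.1) (pvRaiseWitness_get_uncovered_code_block.2) ∧ Raises_get_uncovered_code_block (pvRaiseWitness_get_uncovered_code_block.1) (pvRaiseWitness_get_uncovered_code_block.2) ∧ get_uncovered_code_block_alt (pvRaiseWitness_get_uncovered_code_block.1) (pvRaiseWitness_get_uncovered_code_block.2) = pvRaiseWitnessOut_get_uncovered_code_block)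

-- ===== LEMMAS AND PROOFS =====

-- Both loops, started on the same pending run (s, l, n) (n > 0) with the same blocks so far,
-- close the same missed blocks: A flushes at status changes and at last_line, B at status
-- changes and in pvFlushB; last_line occurs exactly at the final position of rest.
lemma pvFoldAB : ∀ (rest : List (String × String)) (last_line l s : String) (n : Int)
    (bs : List (String × Int)), 0 < n →
    (rest.map Prod.fst).getLast? = some last_line →
    last_line ∉ (rest.map Prod.fst).dropLast →
    (rest.foldl (pvStepA last_line)
        ((if s = "missed" then some l else none), some s, (if s = "missed" then n else 0), bs)).2.2.2
      = pvFlushB (rest.foldl pvStepB (bs, some l, some s, n)) := by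
  intro rest
  induction rest with
  | nil => intro last_line l s n bs hn hlast hnd; simp at hlast
  | cons hd t ih =>
    intro last_line l s n bs hn hlast hnd
    obtain ⟨line, status⟩ := hd
    by_cases ht : t = []
    · subst ht
      rw [List.map_cons, List.map_nil, List.getLast?_singleton, Option.some_inj] at hlast
      subst hlast
      by_cases hss : status = s <;> by_cases hm : s = "missed" <;> by_cases hm2 : status = "missed" <;>
        simp_all [pvStepA, pvStepB, pvFlushB] <;> try omega
    · -- t ≠ []
      obtain ⟨hd2, t2, rfl⟩ := List.exists_cons_of_ne_nil ht
      have hlast' : ((hd2 :: t2).map Prod.fst).getLast? = some last_line := by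
        rw [List.map_cons, List.map_cons, List.getLast?_cons_cons] at hlast
        rw [List.map_cons]; exact hlast
      have hnd0 := hnd
      simp only [List.map_cons, List.dropLast_cons₂, List.mem_cons, not_or] at hnd0
      have hline : line ≠ last_line := fun h => hnd0.1 h.symm
      have hnd' : last_line ∉ ((hd2 :: t2).map Prod.fst).dropLast := by
        simp only [List.map_cons]; simpa using hnd0.2
      by_cases hss : status = s
      · subst hss
        by_cases hm : status = "missed"
        · have h := ih last_line l status (n+1) bs (by omega) hlast' hnd'
          simp only [if_pos hm] at h ⊢
          have hA : pvStepA last_line (some l, some status, n, bs) (line, status)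
              = (some l, some status, n+1, bs) := by simp [pvStepA, hm, hline]
          have hB : pvStepB (bs, some l, some status, n) (line, status)
              = (bs, some l, some status, n+1) := by simp [pvStepB]
          rw [List.foldl_cons (f := pvStepA last_line), hA, List.foldl_cons (f := pvStepB), hB]
          exact h
        · have h := ih last_line l status (n+1) bs (by omega) hlast' hnd'
          simp only [if_neg hm] at h ⊢
          have hA : pvStepA last_line (none, some status, 0, bs) (line, status)
              = (none, some status, 0, bs) := by simp [pvStepA, hm]
          have hB : pvStepB (bs, some l, some status, n) (line, status)
              = (bs, some l, some status, n+1) := by simp [pvStepB]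
          rw [List.foldl_cons (f := pvStepA last_line), hA, List.foldl_cons (f := pvStepB), hB]
          exact h
      · by_cases hm : status = "missed"
        · have hm2 : ¬ s = "missed" := fun h2 => hss (hm.trans h2.symm)
          have h := ih last_line line status 1 bs one_pos hlast' hnd'
          simp only [if_pos hm] at h
          simp only [if_neg hm2]
          have hA : pvStepA last_line (none, some s, 0, bs) (line, status)
              = (some line, some status, 1, bs) := by simp [pvStepA, hm, hm2, hline]
          have hB : pvStepB (bs, some l, some s, n) (line, status)
              = (bs, some line, some status, 1) := by simp [pvStepB, hss, hm2]
          rw [List.foldl_cons (f := pvStepA last_line), hA, List.foldl_cons (f := pvStepB), hB]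
          exact h
        · by_cases hm2 : s = "missed"
          · have h := ih last_line line status 1 (bs ++ [(l, n)]) one_pos hlast' hnd'
            simp only [if_neg hm] at h
            simp only [if_pos hm2]
            have hA : pvStepA last_line (some l, some s, n, bs) (line, status)
                = (none, some status, 0, bs ++ [(l, n)]) := by simp [pvStepA, hm, hm2, hn]
            have hB : pvStepB (bs, some l, some s, n) (line, status)
                = (bs ++ [(l, n)], some line, some status, 1) := by simp [pvStepB, hm, hm2]
            rw [List.foldl_cons (f := pvStepA last_line), hA, List.foldl_cons (f := pvStepB), hB]
            exact h
          · have h := ih last_line line status 1 bs one_pos hlast' hnd'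
            simp only [if_neg hm] at h
            simp only [if_neg hm2]
            have hA : pvStepA last_line (none, some s, 0, bs) (line, status)
                = (none, some status, 0, bs) := by simp [pvStepA, hm]
            have hB : pvStepB (bs, some l, some s, n) (line, status)
                = (bs, some line, some status, 1) := by simp [pvStepB, hss, hm2]
            rw [List.foldl_cons (f := pvStepA last_line), hA, List.foldl_cons (f := pvStepB), hB]
            exact h

lemma pvLast_not_dropLast (l : List String) (a : String) (hnd : l.Nodup)
    (h : l.getLast? = some a) : a ∉ l.dropLast := by
  have hne : l ≠ [] := by rintro rfl; simp at h
  have h2 := List.dropLast_append_getLast hne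
  have hg : l.getLast hne = a := by
    rw [List.getLast?_eq_some_getLast hne] at h; exact Option.some_inj.mp h
  rw [← h2, hg] at hnd
  have hdisj := List.disjoint_of_nodup_append hnd
  intro hmem
  exact hdisj hmem (by simp)

-- A's state machine builds exactly B's blocks list
lemma pvBlocksAB (cov : List (String × String)) (last_line : String)
    (hnd : (cov.map Prod.fst).Nodup)
    (hlast : (cov.map Prod.fst).getLast? = some last_line) :
    (cov.foldl (pvStepA last_line) (none, none, 0, [])).2.2.2
      = pvFlushB (cov.foldl pvStepB ([], none, none, 0)) := by
  match cov with
  | [] => simp at hlast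
  | (l0, s0) :: t =>
    by_cases ht : t = []
    · subst ht
      rw [List.map_cons, List.map_nil, List.getLast?_singleton, Option.some_inj] at hlast
      subst hlast
      by_cases hm : s0 = "missed" <;> simp [pvStepA, pvStepB, pvFlushB, hm]
    · obtain ⟨hd2, t2, rfl⟩ := List.exists_cons_of_ne_nil ht
      have hlast' : ((hd2 :: t2).map Prod.fst).getLast? = some last_line := by
        rw [List.map_cons, List.map_cons, List.getLast?_cons_cons] at hlast
        rw [List.map_cons]; exact hlast
      have hmem : last_line ∈ (hd2 :: t2).map Prod.fst := List.mem_of_getLast? hlast'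
      have hline : l0 ≠ last_line := by
        rintro rfl
        rw [List.map_cons, List.nodup_cons] at hnd
        exact hnd.1 hmem
      have hnd' : last_line ∉ ((hd2 :: t2).map Prod.fst).dropLast := by
        refine pvLast_not_dropLast _ _ ?_ hlast'
        rw [List.map_cons, List.nodup_cons] at hnd
        exact hnd.2
      have h := pvFoldAB (hd2 :: t2) last_line l0 s0 1 [] one_pos hlast' hnd'
      by_cases hm : s0 = "missed"
      · simp only [if_pos hm] at h
        have hA : pvStepA last_line (none, none, 0, []) (l0, s0)
            = (some l0, some s0, 1, []) := by simp [pvStepA, hm, hline]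
        have hB : pvStepB ([], none, none, 0) (l0, s0) = ([], some l0, some s0, 1) := by
          simp [pvStepB]
        rw [List.foldl_cons (f := pvStepA last_line), hA, List.foldl_cons (f := pvStepB), hB]
        exact h
      · simp only [if_neg hm] at h
        have hA : pvStepA last_line (none, none, 0, []) (l0, s0)
            = (none, some s0, 0, []) := by simp [pvStepA, hm]
        have hB : pvStepB ([], none, none, 0) (l0, s0) = ([], some l0, some s0, 1) := by
          simp [pvStepB]
        rw [List.foldl_cons (f := pvStepA last_line), hA, List.foldl_cons (f := pvStepB), hB]
        exact h

lemma find_insertBy (x : String × Int) (ys : List (String × Int)) (p : String × Int → Bool)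
    (hys : ys.Pairwise (fun a b => b.2 ≤ a.2)) :
    (PySem.List.insertBy (fun a b => decide (b.2 < a.2)) x ys).find? p
      = if p x then
          (match ys.find? p with
           | some m => if x.2 ≤ m.2 then some m else some x
           | none => some x)
        else ys.find? p := by
  induction ys with
  | nil => by_cases hp : p x <;> simp [PySem.List.insertBy, hp]
  | cons y t ih =>
    rw [List.pairwise_cons] at hys
    have ih' := ih hys.2
    by_cases hlt : y.2 < x.2
    · -- x inserted in front
      have : PySem.List.insertBy (fun a b => decide (b.2 < a.2)) x (y :: t) = x :: y :: t := by
        simp [PySem.List.insertBy, hlt]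
      rw [this]
      by_cases hp : p x
      · rw [List.find?_cons_of_pos hp]
        cases hf : (y :: t).find? p with
        | none => simp [hp]
        | some m =>
          have hm : m ∈ y :: t := List.mem_of_find?_eq_some hf
          have hle : m.2 ≤ y.2 := by
            rcases List.mem_cons.mp hm with rfl | hmt
            · exact le_rfl
            · exact hys.1 m hmt
          have : ¬ x.2 ≤ m.2 := by omega
          simp [hp, this]
      · rw [List.find?_cons_of_neg (by simpa using hp)]
        simp [hp]
    · have : PySem.List.insertBy (fun a b => decide (b.2 < a.2)) x (y :: t)
          = y :: PySem.List.insertBy (fun a b => decide (b.2 < a.2)) x t := by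
        simp [PySem.List.insertBy, hlt]
      rw [this]
      by_cases hpy : p y
      · rw [List.find?_cons_of_pos hpy, List.find?_cons_of_pos hpy]
        by_cases hp : p x
        · have : x.2 ≤ y.2 := by omega
          simp [hp, this]
        · simp [hp]
      · rw [List.find?_cons_of_neg (by simpa using hpy),
            List.find?_cons_of_neg (by simpa using hpy)]
        exact ih'

lemma max?_append_singleton (x : String × Int) (l : List (String × Int)) :
    PySem.List.max? (l ++ [x]) (fun b => b.2)
      = match PySem.List.max? l (fun b => b.2) with
        | none => some x
        | some m => if m.2 < x.2 then some x else some m := by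
  simp only [PySem.List.max?, List.foldl_append, List.foldl_cons, List.foldl_nil]
  split <;> rename_i h <;> simp_all

-- first acceptable element of the stable descending sort = first maximum of the filtered list
lemma find_sorted_eq_max_filter (p : String × Int → Bool) : ∀ (xs : List (String × Int)),
    (PySem.List.sorted xs (fun b => b.2) true).find? p
      = PySem.List.max? (xs.filter p) (fun b => b.2) := by
  intro xs
  induction xs using List.reverseRecOn with
  | nil => simp [PySem.List.sorted, PySem.List.max?]
  | append_singleton xs x ih =>
    have hs : PySem.List.sorted (xs ++ [x]) (fun b => b.2) true
        = PySem.List.insertBy (fun a b => decide (b.2 < a.2)) x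
            (PySem.List.sorted xs (fun b => b.2) true) := by
      rw [PySem.List.sorted_rev_eq_foldl_insertBy, PySem.List.sorted_rev_eq_foldl_insertBy,
        List.foldl_append]
      simp
    rw [hs, find_insertBy _ _ _ (PySem.List.sorted_pairwise_rev _ _), ih, List.filter_append]
    by_cases hp : p x
    · simp only [List.filter_cons, hp, if_pos, List.filter_nil]
      rw [max?_append_singleton]
      cases hM : PySem.List.max? (xs.filter p) (fun b => b.2) with
      | none => simp
      | some m =>
        by_cases hle : x.2 ≤ m.2
        · have h1 : ¬ m.2 < x.2 := by omega
          simp [hle, h1]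
        · have h1 : m.2 < x.2 := by omega
          simp [hle, h1]
    · simp [hp]

lemma pyGet_neg_one_getLast (xs : List String) (h : xs ≠ []) :
    PySem.List.pyGet? xs (-1) = xs.getLast? := by
  simp [PySem.List.pyGet?, PySem.List.pyIdx?]
  have hl : 1 ≤ xs.length := List.length_pos_iff.mpr h
  rw [if_pos hl]
  simp [List.getLast?_eq_getElem?]


-- ===== VERDICT (by name: the statement is the Claim_ definition above) =====
theorem get_uncovered_code_block_spec : Claim_equal_get_uncovered_code_block := by
  intro cov sk _hdom hpre
  obtain ⟨hne, hnd⟩ := hpre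
  unfold Spec_get_uncovered_code_block
  unfold get_uncovered_code_block get_uncovered_code_block_alt
  have hkeys : cov.map Prod.fst ≠ [] := by simpa using hne
  obtain ⟨last_line, hlast⟩ : ∃ a, (cov.map Prod.fst).getLast? = some a := by
    cases h : (cov.map Prod.fst).getLast? with
    | none => exact absurd (List.getLast?_eq_none_iff.mp h) hkeys
    | some a => exact ⟨a, rfl⟩
  rw [pyGet_neg_one_getLast _ hkeys, hlast]
  simp only
  rw [pvBlocksAB cov last_line hnd hlast, find_sorted_eq_max_filter]
  by_cases hc : (pvFlushB (cov.foldl pvStepB ([], none, none, 0))).filter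
      (fun b => !(sk.contains b.1)) = []
  · rw [hc]; rfl
  · rw [if_neg hc]

@[simp] theorem get_uncovered_code_block_raises : Claim_raises_get_uncovered_code_block := by
  unfold Claim_raises_get_uncovered_code_block
  exact ⟨by intro cov sk _ hr hp; exact hp.1 hr, by decide⟩
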